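-- pv_equiv track=rewrite | github.com/TailGuy/telegraf-app | app/main.py | sanitize_mqtt_topic
-- ===== SOURCE A (Python) =====
-- MQTT_TOPIC_EXCLUSION_CHARS = [
--     "+",    # Single-level wildcard character - illegal in topic names
--     "#",    # Multi-level wildcard character - illegal in topic names
--     "*",    # SMF wildcard character - causes interoperability issues
--     ">",    # SMF wildcard character - causes interoperability issues
--     "$",    # When used at start of topic - reserved for server implementation
--     "!",    # When used at start of topic - causes interoperability issues in SMF (topic exclusions)
--     # " "     # Space character - avoid as best practice to prevent parsing issues
-- ]
--
-- def sanitize_mqtt_topic(topic_name: str) -> str: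
--     """
--     Sanitizes an MQTT topic name by replacing restricted characters.
--     """
--     # Replace restricted characters
--     sanitized_name = topic_name
--     for char in MQTT_TOPIC_EXCLUSION_CHARS:
--         sanitized_name = sanitized_name.replace(char, '_')
--
--     # Handle leading $ if not a system topic
--     if sanitized_name.startswith("$") and not (
--         sanitized_name.startswith("$SYS/") or
--         sanitized_name.startswith("$share/") or
--         sanitized_name.startswith("$noexport/")
--     ):
--         sanitized_name = "_" + sanitized_name[1:]
--
--     return sanitized_name
-- ===== SOURCE B (Python) =====
-- MQTT_TOPIC_EXCLUSION_CHARS = [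
--     "+", "#", "*", ">", "$", "!",
-- ]
--
-- EXCL = "+#*>$!"
--
-- def sanitize_mqtt_topic(topic_name: str) -> str:
--     """
--     Sanitizes an MQTT topic name by replacing restricted characters,
--     in a single pass over the input characters.
--     """
--     return ''.join('_' if c in EXCL else c for c in topic_name)
-- ===== Notes on version B (the rewrite author's own statement) =====
-- stated objective: idiomatic
-- what changed: B builds the result in one pass over the input characters with a membership test, instead of A's six sequential full-string replace passes, and drops A's leading-dollar block, which is dead code because the dollar character is itself one of the replaced characters.
import Mathlib
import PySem

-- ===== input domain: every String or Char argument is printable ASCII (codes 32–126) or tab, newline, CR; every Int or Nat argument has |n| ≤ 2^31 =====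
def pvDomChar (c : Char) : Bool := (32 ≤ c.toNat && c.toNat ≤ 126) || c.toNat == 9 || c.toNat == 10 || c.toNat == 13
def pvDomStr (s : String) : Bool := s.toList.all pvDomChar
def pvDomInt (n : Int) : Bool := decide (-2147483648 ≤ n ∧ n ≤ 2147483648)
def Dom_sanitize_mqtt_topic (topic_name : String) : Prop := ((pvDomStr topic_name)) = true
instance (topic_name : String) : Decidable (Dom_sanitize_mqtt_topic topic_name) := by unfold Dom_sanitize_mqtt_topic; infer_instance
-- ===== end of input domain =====

-- B replaces A's six sequential full-string replace passes (plus a dead leading-dollar block)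
-- by a single pass over the input characters with a membership test; outputs are identical.


-- ===== PORT A =====
def MQTT_TOPIC_EXCLUSION_CHARS : List String := ["+", "#", "*", ">", "$", "!"]

def sanitize_mqtt_topic (topic_name : String) : String :=
  let sanitized_name :=
    MQTT_TOPIC_EXCLUSION_CHARS.foldl (fun s ch => PySem.Str.replace s ch "_") topic_name
  if PySem.Str.startswith sanitized_name "$" &&
      !(PySem.Str.startswith sanitized_name "$SYS/" ||
        PySem.Str.startswith sanitized_name "$share/" ||
        PySem.Str.startswith sanitized_name "$noexport/") then
    "_" ++ PySem.Str.slice sanitized_name (some 1) none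
  else
    sanitized_name

-- ===== PORT B =====
def EXCL : String := "+#*>$!"

def sanitize_mqtt_topic_alt (topic_name : String) : String :=
  String.ofList (topic_name.toList.map (fun c => if c ∈ EXCL.toList then '_' else c))

-- ===== PRECONDITION & SPEC =====
def Spec_sanitize_mqtt_topic (topic_name : String) (out : String) : Prop := out = sanitize_mqtt_topic_alt topic_name
instance (topic_name : String) (out : String) : Decidable (Spec_sanitize_mqtt_topic topic_name out) := by unfold Spec_sanitize_mqtt_topic; infer_instance

-- ===== CLAIM (what is proved, stated in full; the proofs are below) =====
def Claim_equal_sanitize_mqtt_topic : Prop := ∀ (topic_name : String), Dom_sanitize_mqtt_topic topic_name → Spec_sanitize_mqtt_topic topic_name (sanitize_mqtt_topic topic_name)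

-- ===== LEMMAS AND PROOFS =====

-- replace by a single-character pattern is a character map
theorem replace_go_single (o n : Char) :
    ∀ (l : List Char) (fuel : Nat) (acc : List Char), l.length ≤ fuel →
      PySem.Chars.replace.go [o] [n] fuel l acc =
        acc.reverse ++ l.map (fun c => if c = o then n else c) := by
  intro l
  induction l with
  | nil =>
    intro fuel acc _
    cases fuel <;> simp [PySem.Chars.replace.go]
  | cons c t ih =>
    intro fuel acc hle
    cases fuel with
    | zero => simp at hle
    | succ f =>
      have hlen : t.length ≤ f := by simpa using hle
      by_cases h : o = c
      · subst h
        rw [PySem.Chars.replace.go]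
        simp [List.isPrefixOf, ih f (n :: acc) hlen]
      · rw [PySem.Chars.replace.go]
        have hpre : [o].isPrefixOf (c :: t) = false := by
          simp [List.isPrefixOf, h]
        simp [hpre, ih f (c :: acc) hlen, Ne.symm h]

theorem replace_single (o n : Char) (s : List Char) :
    PySem.Chars.replace s [o] [n] = s.map (fun c => if c = o then n else c) := by
  rw [PySem.Chars.replace]
  simp [replace_go_single o n s s.length [] le_rfl]

-- the six replace passes compose to B's single character map
theorem foldl_replace_eq_map (t : String) :
    (MQTT_TOPIC_EXCLUSION_CHARS.foldl (fun s ch => PySem.Str.replace s ch "_") t).toList =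
      t.toList.map (fun c => if c ∈ EXCL.toList then '_' else c) := by
  simp only [MQTT_TOPIC_EXCLUSION_CHARS, List.foldl_cons, List.foldl_nil]
  simp only [PySem.Str.toList_replace]
  simp only [show ("+" : String).toList = ['+'] from rfl,
    show ("#" : String).toList = ['#'] from rfl,
    show ("*" : String).toList = ['*'] from rfl,
    show (">" : String).toList = ['>'] from rfl,
    show ("$" : String).toList = ['$'] from rfl,
    show ("!" : String).toList = ['!'] from rfl,
    show ("_" : String).toList = ['_'] from rfl,
    replace_single, List.map_map]
  apply List.map_congr_left
  intro c _
  simp only [Function.comp]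
  by_cases h1 : c = '+'; · subst h1; decide
  by_cases h2 : c = '#'; · subst h2; decide
  by_cases h3 : c = '*'; · subst h3; decide
  by_cases h4 : c = '>'; · subst h4; decide
  by_cases h5 : c = '$'; · subst h5; decide
  by_cases h6 : c = '!'; · subst h6; decide
  simp [EXCL, h1, h2, h3, h4, h5, h6]

-- the sanitized string never starts with '$', so A's leading-'$' branch is dead
theorem startswith_dollar_false (t : String) :
    PySem.Str.startswith
      (MQTT_TOPIC_EXCLUSION_CHARS.foldl (fun s ch => PySem.Str.replace s ch "_") t) "$" = false := by
  rw [PySem.Str.startswith_eq]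
  rw [Bool.eq_false_iff]
  intro htrue
  have hpre := (PySem.Chars.startswith_iff _ _).mp htrue
  rw [foldl_replace_eq_map] at hpre
  have hmem : '$' ∈ t.toList.map (fun c => if c ∈ EXCL.toList then '_' else c) := by
    have := hpre.sublist.subset
    exact this (by simp [show ("$" : String).toList = ['$'] from rfl])
  rcases List.mem_map.mp hmem with ⟨c, _, hc⟩
  by_cases h : c ∈ EXCL.toList
  · simp [h] at hc
  · simp [h] at hc
    subst hc
    exact h (by decide)

-- ===== VERDICT (by name: the statement is the Claim_ definition above) =====
theorem sanitize_mqtt_topic_spec : Claim_equal_sanitize_mqtt_topic := by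
  intro topic_name _
  unfold Spec_sanitize_mqtt_topic sanitize_mqtt_topic sanitize_mqtt_topic_alt
  simp only [startswith_dollar_false, Bool.false_and, Bool.false_eq_true, if_false]
  apply String.toList_inj.mp
  rw [foldl_replace_eq_map]
  simp
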